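-- pv_equiv track=rewrite | github.com/maxvonhippel/AttackerSynthesis | korg/Characterize.py | parseTrail
-- ===== SOURCE A (Python) =====
-- def parseTrail(trail_body, cycle_indicator=None):
--
--     if cycle_indicator == None:
--         cycle_indicator = "CYCLE"
--
--     ret, i = [[], []], 0
--
--     for line in trail_body.split("\n"):
--
--         if "(daisy:" in line:
--
--             # https://stackoverflow.com/a/29571669/1586231
--             LL = line.rstrip("*")
--             chan = LL[line.rfind("(")+1:-1]
--             msg, evt = None, None
--
--             if "Recv " in line:
--
--                 msg = LL[line.rfind("Recv ") + 5:].split()[0]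
--                 evt = "?"
--
--             if "Send" in line and msg == None and evt == None:
--
--                 msg = LL[line.rfind("Send ") + 5:].split()[0]
--                 evt = "!"
--
--             if "Sent" in line and msg == None and evt == None:
--
--                 msg = LL[line.rfind("Sent ") + 5:].split()[0]
--                 evt = "!"
--
--             if evt != None and msg != None:
--
--                 ret[i].append(chan + " " + evt + " " + msg)
--
--         elif cycle_indicator in line:
--             i = 1
--
--     return ret
-- ===== SOURCE B (Python) =====
-- def _parseLine(line):
--     if "(daisy:" not in line:
--         return None
--     LL = line.rstrip("*")
--     chan = LL[line.rfind("(") + 1:-1]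
--     if "Recv " in line:
--         return chan + " ? " + LL[line.rfind("Recv ") + 5:].split()[0]
--     if "Send" in line:
--         return chan + " ! " + LL[line.rfind("Send ") + 5:].split()[0]
--     if "Sent" in line:
--         return chan + " ! " + LL[line.rfind("Sent ") + 5:].split()[0]
--     return None
--
--
-- def parseTrail(trail_body, cycle_indicator=None):
--     if cycle_indicator is None:
--         cycle_indicator = "CYCLE"
--     lines = trail_body.split("\n")
--     k = len(lines)
--     for j, line in enumerate(lines):
--         if "(daisy:" not in line and cycle_indicator in line:
--             k = j
--             break
--     return [[e for e in map(_parseLine, lines[:k]) if e is not None],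
--             [e for e in map(_parseLine, lines[k:]) if e is not None]]
-- ===== Notes on version B (the rewrite author's own statement) =====
-- stated objective: simpler
-- what changed: B replaces A's single stateful loop (mutable ret[i] index and inline evt/msg option juggling) by one per-line parser helper plus a split of the line list at the first cycle line, building the two result lists independently.
import Mathlib
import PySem

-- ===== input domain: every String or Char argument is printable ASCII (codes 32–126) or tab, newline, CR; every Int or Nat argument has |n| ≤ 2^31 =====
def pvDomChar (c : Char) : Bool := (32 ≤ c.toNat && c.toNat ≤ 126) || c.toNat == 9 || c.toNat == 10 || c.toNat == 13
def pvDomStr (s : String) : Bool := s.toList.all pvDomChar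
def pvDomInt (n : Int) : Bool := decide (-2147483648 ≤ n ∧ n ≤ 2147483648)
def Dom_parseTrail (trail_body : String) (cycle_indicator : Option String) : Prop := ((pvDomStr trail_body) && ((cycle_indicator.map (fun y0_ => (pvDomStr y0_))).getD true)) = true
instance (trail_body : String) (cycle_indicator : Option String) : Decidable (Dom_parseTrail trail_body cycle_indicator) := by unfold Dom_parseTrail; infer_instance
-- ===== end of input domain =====

-- B parses each line once through a single helper and splits the trail at the first
-- cycle line instead of threading a mutable index through one big loop (objective: simpler).
-- Strings are handled on List Char (PySem.Chars); String concatenation is rebuilt with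
-- String.mk over the same character lists (exact).

-- hand port of Python's  s.rstrip("*")  (PySem has no rstrip-with-chars): exact — removes
-- exactly the maximal run of trailing '*' characters.
def pyRstripStar (cs : List Char) : List Char := (cs.reverse.dropWhile (fun c => c == '*')).reverse

-- ===== PORT A =====
-- the body of A's for-loop, over the state (ret[0], ret[1], i); `.headD []` stands for
-- Python's `[0]`, whose IndexError case (empty split) is excluded by Pre_parseTrail.
def parseTrailStep (ci : List Char) (st : List String × List String × Bool) (line : List Char) :
    List String × List String × Bool :=
  let (r0, r1, i) := st
  if PySem.Chars.isIn "(daisy:".toList line then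
    let LL := pyRstripStar line
    let chan := PySem.Chars.slice LL (some (PySem.Chars.rfind line "(".toList + 1)) (some (-1))
    let msg : Option (List Char) := none
    let evt : Option (List Char) := none
    let (msg, evt) :=
      if PySem.Chars.isIn "Recv ".toList line then
        (some ((PySem.Chars.split₀ (PySem.Chars.slice LL (some (PySem.Chars.rfind line "Recv ".toList + 5)) none)).headD []),
         some "?".toList)
      else (msg, evt)
    let (msg, evt) :=
      if PySem.Chars.isIn "Send".toList line && msg.isNone && evt.isNone then
        (some ((PySem.Chars.split₀ (PySem.Chars.slice LL (some (PySem.Chars.rfind line "Send ".toList + 5)) none)).headD []),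
         some "!".toList)
      else (msg, evt)
    let (msg, evt) :=
      if PySem.Chars.isIn "Sent".toList line && msg.isNone && evt.isNone then
        (some ((PySem.Chars.split₀ (PySem.Chars.slice LL (some (PySem.Chars.rfind line "Sent ".toList + 5)) none)).headD []),
         some "!".toList)
      else (msg, evt)
    match evt, msg with
    | some e, some m =>
        let s := String.mk (chan ++ " ".toList ++ e ++ " ".toList ++ m)
        if i then (r0, r1 ++ [s], i) else (r0 ++ [s], r1, i)
    | _, _ => (r0, r1, i)
  else if PySem.Chars.isIn ci line then (r0, r1, true)
  else (r0, r1, i)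

def parseTrail (trail_body : String) (cycle_indicator : Option String) : List (List String) :=
  let ci := (match cycle_indicator with | none => "CYCLE" | some s => s).toList
  let st := (PySem.Chars.splitOn trail_body.toList "\n".toList).foldl (parseTrailStep ci) ([], [], false)
  [st.1, st.2.1]

-- ===== PORT B =====
-- `LL[line.rfind(kw) + 5:].split()[0]` of Source B; `.headD []` is Python's `[0]` (IndexError excluded by Pre_).
def pvFirstWordAfter (line LL : List Char) (kw : String) : List Char :=
  (PySem.Chars.split₀ (PySem.Chars.slice LL (some (PySem.Chars.rfind line kw.toList + 5)) none)).headD []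

-- port of Source B's _parseLine
def pvParseLine (line : List Char) : Option (List Char) :=
  if PySem.Chars.isIn "(daisy:".toList line then
    let LL := pyRstripStar line
    let chan := PySem.Chars.slice LL (some (PySem.Chars.rfind line "(".toList + 1)) (some (-1))
    if PySem.Chars.isIn "Recv ".toList line then some (chan ++ " ? ".toList ++ pvFirstWordAfter line LL "Recv ")
    else if PySem.Chars.isIn "Send".toList line then some (chan ++ " ! ".toList ++ pvFirstWordAfter line LL "Send ")
    else if PySem.Chars.isIn "Sent".toList line then some (chan ++ " ! ".toList ++ pvFirstWordAfter line LL "Sent ")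
    else none
  else none

-- port of Source B's enumerate/break loop: index of the first non-daisy line containing the
-- cycle indicator, length of the list if none
def pvSplitIdx (ci : List Char) : List (List Char) → Nat
  | [] => 0
  | l :: ls =>
      if !PySem.Chars.isIn "(daisy:".toList l && PySem.Chars.isIn ci l then 0
      else pvSplitIdx ci ls + 1

def parseTrail_alt (trail_body : String) (cycle_indicator : Option String) : List (List String) :=
  let ci := (cycle_indicator.getD "CYCLE").toList
  let lines := PySem.Chars.splitOn trail_body.toList "\n".toList
  let k := pvSplitIdx ci lines
  [((lines.take k).filterMap pvParseLine).map String.mk,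
   ((lines.drop k).filterMap pvParseLine).map String.mk]

-- ===== PRECONDITION & SPEC =====
-- whether A returns (rather than raises IndexError) on this line: in the branch A selects,
-- the text taken after the keyword must contain a non-whitespace character (split() nonempty)
def pvLineOK (line : List Char) : Bool :=
  !PySem.Chars.isIn "(daisy:".toList line ||
  (let LL := pyRstripStar line
   if PySem.Chars.isIn "Recv ".toList line then
     !(PySem.Chars.split₀ (PySem.Chars.slice LL (some (PySem.Chars.rfind line "Recv ".toList + 5)) none)).isEmpty
   else if PySem.Chars.isIn "Send".toList line then
     !(PySem.Chars.split₀ (PySem.Chars.slice LL (some (PySem.Chars.rfind line "Send ".toList + 5)) none)).isEmpty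
   else if PySem.Chars.isIn "Sent".toList line then
     !(PySem.Chars.split₀ (PySem.Chars.slice LL (some (PySem.Chars.rfind line "Sent ".toList + 5)) none)).isEmpty
   else true)

-- Pre_ excludes exactly the inputs on which Python A raises IndexError: a '(daisy:' line whose
-- selected keyword (Recv/Send/Sent) is followed by no word, where `.split()[0]` fails.
def Pre_parseTrail (trail_body : String) (cycle_indicator : Option String) : Prop :=
  ∀ l ∈ PySem.Chars.splitOn trail_body.toList "\n".toList, pvLineOK l = true
instance (trail_body : String) (cycle_indicator : Option String) : Decidable (Pre_parseTrail trail_body cycle_indicator) := by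
  unfold Pre_parseTrail; infer_instance

def pvWitness_parseTrail : String × Option String :=
  ("step (daisy:4) Recv ack*\nCYCLE here\nstep (daisy:2) Sent fin", some "CYCLE")

def Spec_parseTrail (trail_body : String) (cycle_indicator : Option String) (out : List (List String)) : Prop := out = parseTrail_alt trail_body cycle_indicator
instance (trail_body : String) (cycle_indicator : Option String) (out : List (List String)) : Decidable (Spec_parseTrail trail_body cycle_indicator out) := by unfold Spec_parseTrail; infer_instance

-- ===== CLAIM (what is proved, stated in full; the proofs are below) =====
def Claim_equal_parseTrail : Prop := ∀ (trail_body : String) (cycle_indicator : Option String), Dom_parseTrail trail_body cycle_indicator → Pre_parseTrail trail_body cycle_indicator → Spec_parseTrail trail_body cycle_indicator (parseTrail trail_body cycle_indicator)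

-- ===== LEMMAS AND PROOFS =====

-- A's loop body, characterised by B's per-line parser
theorem step_eq (ci : List Char) (st : List String × List String × Bool) (line : List Char) :
    parseTrailStep ci st line =
      match pvParseLine line with
      | some m => if st.2.2 then (st.1, st.2.1 ++ [String.mk m], st.2.2) else (st.1 ++ [String.mk m], st.2.1, st.2.2)
      | none =>
          if !PySem.Chars.isIn "(daisy:".toList line && PySem.Chars.isIn ci line then (st.1, st.2.1, true)
          else st := by
  obtain ⟨r0, r1, i⟩ := st
  simp only [parseTrailStep, pvParseLine, pvFirstWordAfter]
  split_ifs <;> simp_all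

-- once i = 1 everything appends to ret[1]
theorem loop_true (ci : List Char) (lines : List (List Char)) (r0 r1 : List String) :
    lines.foldl (parseTrailStep ci) (r0, r1, true) =
      (r0, r1 ++ (lines.filterMap pvParseLine).map String.mk, true) := by
  induction lines generalizing r1 with
  | nil => simp
  | cons l ls ih =>
      rw [List.foldl_cons, step_eq]
      cases h : pvParseLine l with
      | none => simp [ih, h]
      | some m => simp [ih, h]

-- with i = 0 the loop splits the lines at pvSplitIdx
theorem loop_false (ci : List Char) (lines : List (List Char)) (r0 r1 : List String) :
    ((lines.foldl (parseTrailStep ci) (r0, r1, false)).1,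
     (lines.foldl (parseTrailStep ci) (r0, r1, false)).2.1) =
      (r0 ++ ((lines.take (pvSplitIdx ci lines)).filterMap pvParseLine).map String.mk,
       r1 ++ ((lines.drop (pvSplitIdx ci lines)).filterMap pvParseLine).map String.mk) := by
  induction lines generalizing r0 r1 with
  | nil => simp
  | cons l ls ih =>
      rw [List.foldl_cons, step_eq]
      by_cases hc : (!PySem.Chars.isIn "(daisy:".toList l && PySem.Chars.isIn ci l) = true
      · have h12 := hc
        simp only [Bool.and_eq_true, Bool.not_eq_true'] at h12
        obtain ⟨h1, h2⟩ := h12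
        have hd : pvParseLine l = none := by unfold pvParseLine; rw [h1]; simp
        simp only [hd, pvSplitIdx, h1, h2, Bool.not_false, Bool.true_and, if_true,
          List.take_zero, List.drop_zero, loop_true]
        simp [hd]
      · simp only [pvSplitIdx, hc]
        cases h : pvParseLine l with
        | none => simp [h, ih]
        | some m => simp [h, ih]

theorem parseTrail_spec : Claim_equal_parseTrail := by
  intro trail_body cycle_indicator _ _
  unfold Spec_parseTrail
  cases cycle_indicator with
  | none =>
      show parseTrail trail_body none = parseTrail_alt trail_body none
      unfold parseTrail parseTrail_alt
      have h := loop_false "CYCLE".toList (PySem.Chars.splitOn trail_body.toList "\n".toList) [] []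
      rw [Prod.mk.injEq] at h
      simp only [List.nil_append] at h
      simp only [Option.getD]
      rw [h.1, h.2]
  | some s =>
      show parseTrail trail_body (some s) = parseTrail_alt trail_body (some s)
      unfold parseTrail parseTrail_alt
      have h := loop_false s.toList (PySem.Chars.splitOn trail_body.toList "\n".toList) [] []
      rw [Prod.mk.injEq] at h
      simp only [List.nil_append] at h
      simp only [Option.getD]
      rw [h.1, h.2]
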